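-- pv_equiv track=rewrite | github.com/Karna-Balaji-07/Python_2025 | Python_Version_I/Arrays/Subarrays/max_len_same_characters.py | maxs2
-- ===== SOURCE A (Python) =====
-- def maxs2(arr):
--     n = len(arr)
--     maxi = 0
--     for start in range(n):
--         for end in range(n-1,start-1,-1):
--             if arr[start] == arr[end]:
--                 maxi = max(maxi, end-start+1)
--                 break
--     return maxi
-- ===== SOURCE B (Python) =====
-- def maxs2(arr):
--     first = {}
--     maxi = 0
--     for i, v in enumerate(arr):
--         if v not in first:
--             first[v] = i
--         maxi = max(maxi, i - first[v] + 1)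
--     return maxi
-- ===== Notes on version B (the rewrite author's own statement) =====
-- stated objective: faster
-- what changed: Replaced the nested scan (for each start, scan from the right for the last equal element) by a single pass that records each value's first-occurrence index in a dict and maximises i - first[v] + 1.
import Mathlib
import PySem

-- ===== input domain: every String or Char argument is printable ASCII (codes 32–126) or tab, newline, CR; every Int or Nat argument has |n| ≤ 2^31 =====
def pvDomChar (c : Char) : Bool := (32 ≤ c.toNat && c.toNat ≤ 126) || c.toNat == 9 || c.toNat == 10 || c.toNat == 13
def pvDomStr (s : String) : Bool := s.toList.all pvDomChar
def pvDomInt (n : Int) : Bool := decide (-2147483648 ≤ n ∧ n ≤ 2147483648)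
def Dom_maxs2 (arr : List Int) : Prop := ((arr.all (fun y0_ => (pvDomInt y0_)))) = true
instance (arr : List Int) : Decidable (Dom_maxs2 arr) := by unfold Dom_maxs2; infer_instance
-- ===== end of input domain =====

-- B replaces A's nested right-to-left scan per start by a single pass with a dict of
-- first-occurrence indices (objective: faster, O(n) instead of O(n^2)).

-- ===== PORT A =====
-- inner loop 'for end in range(n-1, start-1, -1): if arr[start] == arr[end]: …; break'.
-- Every index A reads is in range (0 ≤ start < n, start ≤ end < n), so pyGetD with
-- default 0 is exact here.
def maxs2Inner (arr : List Int) (start maxi : Int) : List Int → Int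
  | [] => maxi
  | e :: rest =>
      if PySem.List.pyGetD arr start 0 = PySem.List.pyGetD arr e 0 then
        max maxi (e - start + 1)
      else maxs2Inner arr start maxi rest

def maxs2 (arr : List Int) : Int :=
  let n : Int := PySem.List.len arr
  (PySem.List.pyRange 0 n 1).foldl
    (fun maxi start => maxs2Inner arr start maxi (PySem.List.pyRange (n - 1) (start - 1) (-1))) 0

-- ===== PORT B =====
-- one step of B's loop body: 'if v not in first: first[v] = i; maxi = max(maxi, i - first[v] + 1)'
def maxs2AltStep (st : PySem.Dict Int Int × Int) (p : Int × Int) : PySem.Dict Int Int × Int :=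
  let first := if st.1.contains p.2 then st.1 else st.1.insert p.2 p.1
  (first, max st.2 (p.1 - first.getD p.2 0 + 1))

def maxs2_alt (arr : List Int) : Int :=
  ((PySem.List.enumerate arr 0).foldl maxs2AltStep (PySem.Dict.empty, 0)).2

-- ===== PRECONDITION & SPEC =====
def Spec_maxs2 (arr : List Int) (out : Int) : Prop := out = maxs2_alt arr
instance (arr : List Int) (out : Int) : Decidable (Spec_maxs2 arr out) := by unfold Spec_maxs2; infer_instance

-- ===== CLAIM (what is proved, stated in full; the proofs are below) =====
def Claim_equal_maxs2 : Prop := ∀ (arr : List Int), Dom_maxs2 arr → Spec_maxs2 arr (maxs2 arr)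

-- ===== LEMMAS AND PROOFS =====

-- value contributed by A's inner loop at start s (with maxi = 0)
def valA (arr : List Int) (s : Nat) : Int :=
  maxs2Inner arr (s : Int) 0 (PySem.List.pyRange ((arr.length : Int) - 1) ((s : Int) - 1) (-1))

-- value contributed by B at index i: i - (first occurrence of arr[i]) + 1
def valB (arr : List Int) (i : Nat) : Int :=
  (i : Int) - (arr.idxOf (arr.getD i 0) : Int) + 1

-- idxOf is minimal among matching indices
lemma idxOf_le_of_getElem {l : List Int} {v : Int} {j : Nat} (hj : j < l.length)
    (h : l[j] = v) : l.idxOf v ≤ j := by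
  have hv : v ∈ l := h ▸ List.getElem_mem hj
  have hmem : v ∈ l.take (j + 1) := by
    have hlt : j < (l.take (j + 1)).length := by simp; omega
    have hh : (l.take (j + 1))[j]'hlt = v := by rw [List.getElem_take]; exact h
    exact hh ▸ List.getElem_mem hlt
  have := (List.mem_take_iff_idxOf_lt hv).mp hmem
  omega

-- A's inner scan from index a downwards: finds the largest matching index
lemma innerScan (arr : List Int) (s : Nat) :
    ∀ (a : Nat), s ≤ a → a < arr.length →
      (∀ j : Nat, a < j → j < arr.length → arr.getD j 0 ≠ arr.getD s 0) →
      ∃ e : Nat, s ≤ e ∧ e ≤ a ∧ arr.getD e 0 = arr.getD s 0 ∧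
        (∀ m : Int, maxs2Inner arr (s : Int) m (PySem.List.pyRange (a : Int) ((s : Int) - 1) (-1))
            = max m ((e : Int) - (s : Int) + 1)) ∧
        (∀ j : Nat, j < arr.length → arr.getD j 0 = arr.getD s 0 → j ≤ e) := by
  intro a
  induction a using Nat.strong_induction_on with
  | _ a ih =>
    intro hsa han htop
    have hcons : PySem.List.pyRange (a : Int) ((s : Int) - 1) (-1)
        = (a : Int) :: PySem.List.pyRange ((a : Int) - 1) ((s : Int) - 1) (-1) :=
      PySem.List.pyRange_neg_one_cons (by omega)
    by_cases hm : arr.getD a 0 = arr.getD s 0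
    · refine ⟨a, hsa, le_refl a, hm, ?_, ?_⟩
      · intro m
        rw [hcons]
        simp only [maxs2Inner, PySem.List.pyGetD_natCast]
        rw [if_pos hm.symm]
      · intro j hj hjm
        by_contra hc
        exact htop j (by omega) hj hjm
    · have hne : s ≠ a := fun h => hm (h ▸ rfl)
      obtain ⟨e, h1, h2, h3, h4, h5⟩ := ih (a - 1) (by omega) (by omega) (by omega)
        (by
          intro j hj hjn
          by_cases hja : j = a
          · exact hja ▸ hm
          · exact htop j (by omega) hjn)
      refine ⟨e, h1, by omega, h3, ?_, h5⟩
      intro m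
      rw [hcons]
      simp only [maxs2Inner, PySem.List.pyGetD_natCast]
      rw [if_neg (fun hh => hm hh.symm)]
      have hcast : ((a : Int) - 1) = ((a - 1 : Nat) : Int) := by omega
      rw [hcast, h4 m]

lemma innerSpec (arr : List Int) (s : Nat) (hs : s < arr.length) :
    ∃ e : Nat, s ≤ e ∧ e < arr.length ∧ arr.getD e 0 = arr.getD s 0 ∧
      (∀ m : Int, maxs2Inner arr (s : Int) m
          (PySem.List.pyRange ((arr.length : Int) - 1) ((s : Int) - 1) (-1))
          = max m ((e : Int) - (s : Int) + 1)) ∧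
      (∀ j : Nat, j < arr.length → arr.getD j 0 = arr.getD s 0 → j ≤ e) := by
  obtain ⟨e, h1, h2, h3, h4, h5⟩ := innerScan arr s (arr.length - 1) (by omega) (by omega)
    (by intro j hj hjn; exfalso; omega)
  have hcast : ((arr.length : Int) - 1) = ((arr.length - 1 : Nat) : Int) := by omega
  refine ⟨e, h1, by omega, h3, ?_, h5⟩
  intro m
  rw [hcast, h4 m]

-- a fold whose step is 'max of a projection' is a fold of max over the mapped list
lemma foldl_step_max {l : List Nat} {F : Int → Nat → Int} {f : Nat → Int}
    (h : ∀ s ∈ l, ∀ m : Int, F m s = max m (f s)) :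
    ∀ m : Int, l.foldl F m = (l.map f).foldl max m := by
  induction l with
  | nil => intro m; rfl
  | cons x t ih =>
      intro m
      simp only [List.foldl_cons, List.map_cons]
      rw [h x (by simp) m, ih (fun s hs => h s (by simp [hs]))]

lemma A_eq (arr : List Int) :
    maxs2 arr = ((List.range arr.length).map (valA arr)).foldl max 0 := by
  have key : ∀ s ∈ List.range arr.length, ∀ m : Int,
      maxs2Inner arr (s : Int) m
        (PySem.List.pyRange ((arr.length : Int) - 1) ((s : Int) - 1) (-1))
        = max m (valA arr s) := by
    intro s hsm m
    obtain ⟨e, hse, _, _, hval, _⟩ := innerSpec arr s (List.mem_range.mp hsm)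
    have hA : valA arr s = (e : Int) - s + 1 := by
      rw [valA, hval 0]; exact max_eq_right (by omega)
    rw [hval m, hA]
  simp only [maxs2, PySem.List.len_eq]
  rw [PySem.List.pyRange_zero_natCast, List.foldl_map]
  exact foldl_step_max key 0

lemma B_inv : ∀ (suf pre : List Int) (d : PySem.Dict Int Int) (m : Int),
    (∀ v : Int, d.get? v = if v ∈ pre then some ((pre.idxOf v : Nat) : Int) else none) →
    ((PySem.List.enumerate suf (pre.length : Int)).foldl maxs2AltStep (d, m)).2
      = ((List.range suf.length).map (fun k =>
          ((pre.length + k : Nat) : Int) - (((pre ++ suf).idxOf (suf.getD k 0) : Nat) : Int) + 1)).foldl max m := by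
  intro suf
  induction suf with
  | nil => intro pre d m hinv; simp [PySem.List.enumerate_nil]
  | cons x rest ih =>
    intro pre d m hinv
    rw [PySem.List.enumerate_cons, List.foldl_cons]
    -- the value B records for index pre.length is pre.length - idxOf x (pre ++ x :: rest) + 1
    have hidx : ((pre ++ x :: rest).idxOf x : Int)
        = (if d.contains x then d else d.insert x (pre.length : Int)).getD x 0 := by
      by_cases hx : x ∈ pre
      · have hc : d.contains x = true := by
          rw [PySem.Dict.contains_eq_isSome_get?, hinv x, if_pos hx]; rfl
        rw [hc, if_pos rfl, PySem.Dict.getD_eq_get?_getD, hinv x, if_pos hx,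
          List.idxOf_append_of_mem hx]
        rfl
      · have hc : d.contains x = false := by
          rw [PySem.Dict.contains_eq_isSome_get?, hinv x, if_neg hx]; rfl
        rw [hc, if_neg (by simp), PySem.Dict.getD_insert_self,
          List.idxOf_append_of_notMem hx, List.idxOf_cons_self]
        push_cast; ring
    have hstep : maxs2AltStep (d, m) ((pre.length : Int), x)
        = (if d.contains x then d else d.insert x (pre.length : Int),
            max m ((pre.length : Int) - ((pre ++ x :: rest).idxOf x : Int) + 1)) := by
      simp only [maxs2AltStep, hidx]
    rw [hstep]
    -- the updated dict satisfies the invariant for pre ++ [x]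
    have hinv' : ∀ v : Int, (if d.contains x then d else d.insert x (pre.length : Int)).get? v
        = if v ∈ pre ++ [x] then some (((pre ++ [x]).idxOf v : Nat) : Int) else none := by
      intro v
      by_cases hx : x ∈ pre
      · have hc : d.contains x = true := by
          rw [PySem.Dict.contains_eq_isSome_get?, hinv x, if_pos hx]; rfl
        rw [hc, if_pos rfl, hinv v]
        by_cases hv : v ∈ pre
        · rw [if_pos hv, if_pos (by simp [hv]), List.idxOf_append_of_mem hv]
        · rw [if_neg hv, if_neg (by
            simp only [List.mem_append, List.mem_singleton]
            rintro (h | rfl)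
            · exact hv h
            · exact hv hx)]
      · have hc : d.contains x = false := by
          rw [PySem.Dict.contains_eq_isSome_get?, hinv x, if_neg hx]; rfl
        rw [hc, if_neg (by simp)]
        by_cases hv : v = x
        · subst hv
          rw [PySem.Dict.get?_insert_self, if_pos (by simp),
            List.idxOf_append_of_notMem hx, List.idxOf_cons_self]
          push_cast; ring_nf
        · rw [PySem.Dict.get?_insert_of_ne d ((pre.length : Int)) hv, hinv v]
          by_cases hvp : v ∈ pre
          · rw [if_pos hvp, if_pos (by simp [hvp]), List.idxOf_append_of_mem hvp]
          · rw [if_neg hvp, if_neg (by simp [hvp, hv])]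
    have hlen : ((pre.length : Int)) + 1 = (((pre ++ [x]).length : Nat) : Int) := by
      simp
    rw [hlen, ih (pre ++ [x]) _ _ hinv']
    -- now line up the two mapped ranges
    rw [List.length_cons, List.range_succ_eq_map, List.map_cons, List.foldl_cons, List.map_map]
    simp only [List.getD_cons_zero, Nat.add_zero]
    have happ : pre ++ x :: rest = (pre ++ [x]) ++ rest := by simp
    rw [happ]
    congr 1
    apply List.map_congr_left
    intro k hk
    have hc2 : ((pre ++ [x]).length + k : Nat) = (pre.length + (k + 1) : Nat) := by
      simp [List.length_append]; omega
    rw [hc2]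
    simp

lemma B_eq (arr : List Int) :
    maxs2_alt arr = ((List.range arr.length).map (valB arr)).foldl max 0 := by
  have h0 : ∀ v : Int, (PySem.Dict.empty : PySem.Dict Int Int).get? v
      = if v ∈ ([] : List Int) then some ((([] : List Int).idxOf v : Nat) : Int) else none := by
    intro v; simp [PySem.Dict.get?_empty]
  have := B_inv arr [] PySem.Dict.empty 0 h0
  simp only [List.length_nil, Nat.cast_zero, List.nil_append, Nat.zero_add] at this
  rw [maxs2_alt, this]
  rfl

lemma foldl_max_le_of {l : List Int} {a b : Int} (hab : a ≤ b) (h : ∀ x ∈ l, x ≤ b) :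
    l.foldl max a ≤ b := by
  induction l generalizing a with
  | nil => exact hab
  | cons x t ih =>
      simp only [List.foldl_cons]
      exact ih (max_le hab (h x (by simp))) (fun y hy => h y (by simp [hy]))

lemma foldl_max_map_le {f g : Nat → Int} {l1 l2 : List Nat}
    (h : ∀ x ∈ l1, ∃ y ∈ l2, f x ≤ g y) :
    (l1.map f).foldl max 0 ≤ (l2.map g).foldl max 0 := by
  apply foldl_max_le_of (PySem.List.le_foldl_max _ _).1
  intro x hx
  obtain ⟨x0, hx0, rfl⟩ := List.mem_map.mp hx
  obtain ⟨y, hy, hle⟩ := h x0 hx0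
  exact le_trans hle ((PySem.List.le_foldl_max _ _).2 _ (List.mem_map_of_mem hy))

-- ===== VERDICT (by name: the statement is the Claim_ definition above) =====
theorem maxs2_spec : Claim_equal_maxs2 := by
  intro arr _
  show maxs2 arr = maxs2_alt arr
  rw [A_eq, B_eq]
  apply le_antisymm
  · apply foldl_max_map_le
    intro s hs
    have hsn : s < arr.length := List.mem_range.mp hs
    obtain ⟨e, hse, hen, hmatch, hval, _⟩ := innerSpec arr s hsn
    refine ⟨e, List.mem_range.mpr hen, ?_⟩
    have hA : valA arr s = (e : Int) - s + 1 := by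
      have := hval 0
      rw [valA, this, max_eq_right (by omega)]
    have hidx : arr.idxOf (arr.getD e 0) ≤ s := by
      rw [hmatch]
      exact idxOf_le_of_getElem hsn (by rw [List.getD_eq_getElem _ _ hsn])
    rw [hA, valB]
    omega
  · apply foldl_max_map_le
    intro i hi
    have hin : i < arr.length := List.mem_range.mp hi
    have hvmem : arr.getD i 0 ∈ arr := by
      rw [List.getD_eq_getElem _ _ hin]; exact List.getElem_mem hin
    set f0 := arr.idxOf (arr.getD i 0) with hf0
    have hf0n : f0 < arr.length := List.idxOf_lt_length_of_mem hvmem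
    have hf0v : arr.getD f0 0 = arr.getD i 0 := by
      rw [List.getD_eq_getElem _ _ hf0n]
      exact List.getElem_idxOf hf0n
    obtain ⟨e, hse, hen, _, hval, hmax⟩ := innerSpec arr f0 hf0n
    refine ⟨f0, List.mem_range.mpr hf0n, ?_⟩
    have hA : valA arr f0 = (e : Int) - f0 + 1 := by
      have := hval 0
      rw [valA, this, max_eq_right (by omega)]
    have hie : i ≤ e := hmax i hin (by rw [hf0v])
    rw [hA, valB]
    omega
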